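-- pv_equiv track=rewrite | github.com/LaughD/Algorithm-Coding-test-Study | programmers/완전탐색/모의고사(Level1).py | solution
-- ===== SOURCE A (Python) =====
-- def solution(answers):
--     abstention1 = [1, 2, 3, 4, 5]
--     abstention2 = [2, 1, 2, 3, 2, 4, 2, 5]
--     abstention3 = [ 3, 3, 1, 1, 2, 2, 4, 4, 5, 5]
--     result = {1 : 0, 2 : 0, 3: 0}
--     idx = 0
--     for answer in answers:
--         result[1] += (abstention1[idx % 5] == answer)
--         result[2] += (abstention2[idx % 8] == answer)
--         result[3] += (abstention3[idx % 10] == answer)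
--         idx += 1
--     return list(filter(lambda x: result[x] == max(result.values()), result))
-- ===== SOURCE B (Python) =====
-- def solution(answers):
--     # Bucket the answers once by (position mod 40, value); 40 = lcm(5, 8, 10),
--     # the common period of the three patterns. Each score is then a fixed
--     # 40-term table lookup, independent of the length of answers.
--     keys = [(i % 40, a) for i, a in enumerate(answers)]
--     cnt = {}
--     for key in keys:
--         cnt[key] = cnt.get(key, 0) + 1
--     patterns = {1: [1, 2, 3, 4, 5],
--                 2: [2, 1, 2, 3, 2, 4, 2, 5],
--                 3: [3, 3, 1, 1, 2, 2, 4, 4, 5, 5]}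
--     scores = {k: sum(cnt.get((r, pat[r % len(pat)]), 0) for r in range(40))
--               for k, pat in patterns.items()}
--     best = max(scores.values())
--     return [k for k in scores if scores[k] == best]
-- ===== Notes on version B (the rewrite author's own statement) =====
-- stated objective: alternative
-- what changed: Instead of comparing every answer against all three patterns in one interleaved loop, B buckets the answers once into a hash index keyed by (position mod 40, value) -- 40 being the common period of the patterns -- and then reads each score off as a fixed 40-term table lookup sum, so the per-pattern scans disappear.
import Mathlib
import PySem

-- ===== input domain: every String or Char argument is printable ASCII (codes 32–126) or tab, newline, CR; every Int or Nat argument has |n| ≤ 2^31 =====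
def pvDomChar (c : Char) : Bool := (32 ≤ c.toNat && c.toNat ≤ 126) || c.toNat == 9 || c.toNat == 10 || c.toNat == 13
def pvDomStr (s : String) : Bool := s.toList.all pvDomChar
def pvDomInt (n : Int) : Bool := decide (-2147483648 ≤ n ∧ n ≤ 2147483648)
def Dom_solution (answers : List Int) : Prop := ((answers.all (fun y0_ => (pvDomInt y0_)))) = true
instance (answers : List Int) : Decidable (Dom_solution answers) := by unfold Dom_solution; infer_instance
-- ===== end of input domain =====

-- B replaces A's three interleaved per-answer pattern comparisons by a hash index built once
-- over (position mod 40, answer) — 40 = lcm(5,8,10) — from which each score is a 40-term lookup sum.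

-- ===== PORT A =====
-- A's dict {1:0,2:0,3:0} with three fixed keys is ported by hand as a triple (r1,r2,r3);
-- the Python boolean added to an int is ported as 'if … then 1 else 0' (exact).
def solutionLoop (xs : List Int) (idx : Nat) (r : Int × Int × Int) : Int × Int × Int :=
  match xs with
  | [] => r
  | a :: rest =>
      solutionLoop rest (idx + 1)
        (r.1 + (if ([1, 2, 3, 4, 5] : List Int).getD (idx % 5) 0 == a then 1 else 0),
         r.2.1 + (if ([2, 1, 2, 3, 2, 4, 2, 5] : List Int).getD (idx % 8) 0 == a then 1 else 0),
         r.2.2 + (if ([3, 3, 1, 1, 2, 2, 4, 4, 5, 5] : List Int).getD (idx % 10) 0 == a then 1 else 0))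

def solution (answers : List Int) : List Int :=
  let r := solutionLoop answers 0 (0, 0, 0)
  -- max(result.values()) over values in key order; filter keeps keys 1,2,3 in order
  let m := max r.1 (max r.2.1 r.2.2)
  ([1, 2, 3] : List Int).filter fun x =>
    (if x == 1 then r.1 else if x == 2 then r.2.1 else r.2.2) == m

-- ===== PORT B =====
-- '[(i % 40, a) for i, a in enumerate(answers)]'
def bKeys (answers : List Int) : List (Int × Int) :=
  (PySem.List.enumerate answers 0).map (fun p => (PySem.Int.mod p.1 40, p.2))

-- 'cnt = {}; for key in keys: cnt[key] = cnt.get(key, 0) + 1'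
def bCnt (answers : List Int) : PySem.Dict (Int × Int) Int :=
  (bKeys answers).foldl (fun d key => d.insert key (d.getD key 0 + 1)) PySem.Dict.empty

-- 'sum(cnt.get((r, pat[r % len(pat)]), 0) for r in range(40))';
-- pat[r % len(pat)] is always in range, ported as pyGetD with default 0 (exact here).
def bScore (cnt : PySem.Dict (Int × Int) Int) (pat : List Int) : Int :=
  (PySem.List.pyRange 0 40 1).foldl
    (fun acc r => acc + cnt.getD (r, PySem.List.pyGetD pat (PySem.Int.mod r (pat.length : Int)) 0) 0) 0

-- B's scores dict has the three fixed keys 1,2,3: ported as three lets, in key order.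
def solution_alt (answers : List Int) : List Int :=
  let cnt := bCnt answers
  let s1 := bScore cnt [1, 2, 3, 4, 5]
  let s2 := bScore cnt [2, 1, 2, 3, 2, 4, 2, 5]
  let s3 := bScore cnt [3, 3, 1, 1, 2, 2, 4, 4, 5, 5]
  let best := max s1 (max s2 s3)
  ([1, 2, 3] : List Int).filter fun k =>
    (if k == 1 then s1 else if k == 2 then s2 else s3) == best

-- ===== PRECONDITION & SPEC =====
def Spec_solution (answers : List Int) (out : List Int) : Prop := out = solution_alt answers
instance (answers : List Int) (out : List Int) : Decidable (Spec_solution answers out) := by unfold Spec_solution; infer_instance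

-- ===== CLAIM (what is proved, stated in full; the proofs are below) =====
def Claim_equal_solution : Prop := ∀ (answers : List Int), Dom_solution answers → Spec_solution answers (solution answers)

-- ===== LEMMAS AND PROOFS =====

-- Proof-only mirror of bKeys with a Nat start index.
def keysFrom (i : Nat) (xs : List Int) : List (Int × Int) :=
  match xs with
  | [] => []
  | a :: t => (((i % 40 : Nat) : Int), a) :: keysFrom (i + 1) t

-- Proof-only mirror of A's per-pattern score (A's loop splits into three of these).
def scoreFrom (pat : List Int) (i : Nat) (xs : List Int) : Int :=
  match xs with
  | [] => 0
  | a :: rest => (if pat.getD (i % pat.length) 0 == a then (1 : Int) else 0) + scoreFrom pat (i + 1) rest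

theorem solutionLoop_eq (xs : List Int) (idx : Nat) (r1 r2 r3 : Int) :
    solutionLoop xs idx (r1, r2, r3) =
      (r1 + scoreFrom [1, 2, 3, 4, 5] idx xs,
       r2 + scoreFrom [2, 1, 2, 3, 2, 4, 2, 5] idx xs,
       r3 + scoreFrom [3, 3, 1, 1, 2, 2, 4, 4, 5, 5] idx xs) := by
  induction xs generalizing idx r1 r2 r3 with
  | nil => simp [solutionLoop, scoreFrom]
  | cons a rest ih =>
      simp only [solutionLoop, scoreFrom, ih, List.length_cons]
      norm_num
      refine ⟨by ring, by ring, by ring⟩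

theorem bKeys_eq_aux (xs : List Int) (i : Nat) :
    (PySem.List.enumerate xs (i : Int)).map (fun p => (PySem.Int.mod p.1 40, p.2)) = keysFrom i xs := by
  induction xs generalizing i with
  | nil => simp [PySem.List.enumerate_nil, keysFrom]
  | cons a t ih =>
      simp only [PySem.List.enumerate_cons, List.map_cons, keysFrom]
      have h1 : PySem.Int.mod (i : Int) 40 = (((i % 40 : Nat)) : Int) := by
        exact_mod_cast PySem.Int.mod_natCast i 40
      have h2 := ih (i + 1)
      push_cast at h2
      rw [h1, h2]

theorem bKeys_eq (xs : List Int) : bKeys xs = keysFrom 0 xs := by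
  unfold bKeys
  have h0 := bKeys_eq_aux xs 0
  rwa [Nat.cast_zero] at h0

theorem scoreFrom_eq_sum (pat : List Int) (hL : pat.length ∣ 40) (xs : List Int) (i : Nat) :
    scoreFrom pat i xs =
      ∑ r ∈ Finset.range 40, ((keysFrom i xs).count (((r : Nat) : Int), pat.getD (r % pat.length) 0) : Int) := by
  induction xs generalizing i with
  | nil => simp [scoreFrom, keysFrom]
  | cons a t ih =>
      simp only [scoreFrom, keysFrom, List.count_cons, ih (i + 1)]
      push_cast
      rw [Finset.sum_add_distrib]
      have hind : ∀ r : Nat,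
          (if ((((i : Int) % 40), a) == (((r : Nat) : Int), pat.getD (r % pat.length) 0)) = true then (1 : Int) else 0)
            = (if r = i % 40 then (if pat.getD (r % pat.length) 0 = a then (1 : Int) else 0) else 0) := by
        intro r
        rcases eq_or_ne r (i % 40) with hr | hr
        · subst hr
          have hc : (((i % 40 : Nat)) : Int) = (i : Int) % 40 := by push_cast; ring
          simp [Prod.ext_iff, hc]
          split_ifs with h1 h2 <;> simp_all
        · have hne : (i : Int) % 40 ≠ ((r : Nat) : Int) := by omega
          simp [Prod.ext_iff, hne, hr]
      have hsum :
          (∑ r ∈ Finset.range 40,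
            (if ((((i : Int) % 40), a) == (((r : Nat) : Int), pat.getD (r % pat.length) 0)) = true then (1 : Int) else 0))
          = (if pat.getD (i % pat.length) 0 == a then (1 : Int) else 0) := by
        rw [Finset.sum_congr rfl (fun r _ => hind r)]
        rw [Finset.sum_ite_eq' (Finset.range 40) (i % 40)
              (fun r => if pat.getD (r % pat.length) 0 = a then (1 : Int) else 0)]
        have hmem : i % 40 ∈ Finset.range 40 := Finset.mem_range.mpr (Nat.mod_lt _ (by norm_num))
        rw [if_pos hmem, Nat.mod_mod_of_dvd i hL]
        split_ifs with h1 h2 <;> simp_all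
      rw [hsum]
      ring

theorem pyRange40 : PySem.List.pyRange 0 40 1 =
    [0, 1, 2, 3, 4, 5, 6, 7, 8, 9, 10, 11, 12, 13, 14, 15, 16, 17, 18, 19,
     20, 21, 22, 23, 24, 25, 26, 27, 28, 29, 30, 31, 32, 33, 34, 35, 36, 37, 38, 39] := by
  decide

theorem bCnt_eq (xs : List Int) : bCnt xs = PySem.Dict.counter (bKeys xs) :=
  PySem.Dict.foldl_insert_getD_add_one_eq_counter (bKeys xs)

theorem bScore_eq1 (xs : List Int) :
    bScore (bCnt xs) [1, 2, 3, 4, 5] = scoreFrom [1, 2, 3, 4, 5] 0 xs := by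
  rw [scoreFrom_eq_sum [1, 2, 3, 4, 5] (by norm_num) xs 0, ← bKeys_eq]
  unfold bScore
  rw [bCnt_eq, pyRange40]
  simp only [List.foldl, PySem.Dict.getD_counter]
  simp [Finset.sum_range_succ, PySem.List.pyGetD, PySem.List.pyGet?, PySem.List.pyIdx?, PySem.Int.mod, Int.fmod, List.getD]

theorem bScore_eq2 (xs : List Int) :
    bScore (bCnt xs) [2, 1, 2, 3, 2, 4, 2, 5] = scoreFrom [2, 1, 2, 3, 2, 4, 2, 5] 0 xs := by
  rw [scoreFrom_eq_sum [2, 1, 2, 3, 2, 4, 2, 5] (by norm_num) xs 0, ← bKeys_eq]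
  unfold bScore
  rw [bCnt_eq, pyRange40]
  simp only [List.foldl, PySem.Dict.getD_counter]
  simp [Finset.sum_range_succ, PySem.List.pyGetD, PySem.List.pyGet?, PySem.List.pyIdx?, PySem.Int.mod, Int.fmod, List.getD]

theorem bScore_eq3 (xs : List Int) :
    bScore (bCnt xs) [3, 3, 1, 1, 2, 2, 4, 4, 5, 5] = scoreFrom [3, 3, 1, 1, 2, 2, 4, 4, 5, 5] 0 xs := by
  rw [scoreFrom_eq_sum [3, 3, 1, 1, 2, 2, 4, 4, 5, 5] (by norm_num) xs 0, ← bKeys_eq]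
  unfold bScore
  rw [bCnt_eq, pyRange40]
  simp only [List.foldl, PySem.Dict.getD_counter]
  simp [Finset.sum_range_succ, PySem.List.pyGetD, PySem.List.pyGet?, PySem.List.pyIdx?, PySem.Int.mod, Int.fmod, List.getD]

-- ===== VERDICT (by name: the statement is the Claim_ definition above) =====
theorem solution_spec : Claim_equal_solution := by
  intro answers _
  unfold Spec_solution solution solution_alt
  simp only [solutionLoop_eq, bScore_eq1, bScore_eq2, bScore_eq3, zero_add]
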